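-- pv_equiv track=rewrite | github.com/SimpleTheory/dart-dataclasses-engine | src/dart_dataclasses/writing/class_functions.py | left_pad_string
-- ===== SOURCE A (Python) =====
-- def left_pad_string(string: str, num_spaces: int, start=True) -> str:
--     """
--     Left pads a multiline string with spaces. (Chatgpt generated)
--     """
--     # Split the string into individual lines.
--     lines = string.split("\n")
--
--     # Loop over each line and add the desired number of spaces to the beginning.
--     for i in range(len(lines)):
--         if not start and not i:
--             continue
--         lines[i] = " " * num_spaces + lines[i]
--
--     # Join the lines back together into a single string.
--     padded_string = "\n".join(lines)
--
--     return padded_string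
-- ===== SOURCE B (Python) =====
-- def left_pad_string(string: str, num_spaces: int, start=True) -> str:
--     """Pad every line via one replace pass instead of split/loop/join."""
--     prefix = " " * num_spaces
--     result = string.replace("\n", "\n" + prefix)
--     if start:
--         result = prefix + result
--     return result
-- ===== Notes on version B (the rewrite author's own statement) =====
-- stated objective: simpler
-- what changed: Replaces A's split-into-lines, index loop with per-line prepend, and join by a single string.replace(' ', ' '+prefix) pass plus one conditional prepend of the prefix for the first line.
import Mathlib
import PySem

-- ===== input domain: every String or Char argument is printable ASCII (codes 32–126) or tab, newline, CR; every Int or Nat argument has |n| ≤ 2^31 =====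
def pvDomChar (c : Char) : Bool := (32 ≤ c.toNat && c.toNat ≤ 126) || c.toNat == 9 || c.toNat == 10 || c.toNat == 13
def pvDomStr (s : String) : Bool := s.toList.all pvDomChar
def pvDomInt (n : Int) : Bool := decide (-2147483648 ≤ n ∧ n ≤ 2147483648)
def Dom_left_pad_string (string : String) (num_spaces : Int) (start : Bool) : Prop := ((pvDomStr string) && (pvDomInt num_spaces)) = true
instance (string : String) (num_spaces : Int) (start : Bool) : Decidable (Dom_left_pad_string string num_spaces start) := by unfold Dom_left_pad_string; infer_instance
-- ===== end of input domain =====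

-- B replaces A's split/index-loop/join with a single string.replace pass plus a conditional head prepend (objective: simpler).

-- ===== PORT A =====
-- Port of A at the List Char level (PySem.Chars is exact there); " " * num_spaces is
-- PySem.List.pyRepeat [' '] num_spaces, lines[i] access/assignment uses getD/set on the
-- in-range indices produced by range(len(lines)).
def left_pad_string (string : String) (num_spaces : Int) (start : Bool) : String :=
  -- lines = string.split("\n")
  let lines := PySem.Chars.splitOn string.toList ['\n']
  -- for i in range(len(lines)): if not start and not i: continue; lines[i] = " " * num_spaces + lines[i]
  let padded := (PySem.List.pyRange 0 (lines.length : Int) 1).foldl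
    (fun ls i =>
      if !start && i == 0 then ls
      else ls.set i.toNat (PySem.List.pyRepeat [' '] num_spaces ++ ls.getD i.toNat []))
    lines
  -- padded_string = "\n".join(lines)
  String.ofList (PySem.Chars.join ['\n'] padded)

-- ===== PORT B =====
def left_pad_string_alt (string : String) (num_spaces : Int) (start : Bool) : String :=
  -- prefix = " " * num_spaces
  let pfx := PySem.List.pyRepeat [' '] num_spaces
  -- result = string.replace("\n", "\n" + prefix)
  let result := PySem.Chars.replace string.toList ['\n'] ('\n' :: pfx)
  -- if start: result = prefix + result
  String.ofList (if start then pfx ++ result else result)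

-- ===== PRECONDITION & SPEC =====
def Spec_left_pad_string (string : String) (num_spaces : Int) (start : Bool) (out : String) : Prop := out = left_pad_string_alt string num_spaces start
instance (string : String) (num_spaces : Int) (start : Bool) (out : String) : Decidable (Spec_left_pad_string string num_spaces start out) := by unfold Spec_left_pad_string; infer_instance

-- ===== CLAIM (what is proved, stated in full; the proofs are below) =====
def Claim_equal_left_pad_string : Prop := ∀ (string : String) (num_spaces : Int) (start : Bool), Dom_left_pad_string string num_spaces start → Spec_left_pad_string string num_spaces start (left_pad_string string num_spaces start)

-- ===== LEMMAS AND PROOFS =====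

/-- Reference function: pad every line-start after a newline with `p`. -/
def padNL (p : List Char) : List Char → List Char
  | [] => []
  | c :: t => if c = '\n' then c :: (p ++ padNL p t) else c :: padNL p t

/-- Reference split on '\n' with an accumulated current piece. -/
def mySplit : List Char → List Char → List (List Char)
  | pre, [] => [pre]
  | pre, c :: t => if c = '\n' then pre :: mySplit [] t else mySplit (pre ++ [c]) t

theorem padNL_nil (p : List Char) : padNL p [] = [] := rfl

theorem padNL_cons_nl (p t : List Char) : padNL p ('\n' :: t) = '\n' :: (p ++ padNL p t) := by
  simp [padNL]

theorem padNL_cons (p : List Char) (c : Char) (t : List Char) (hc : c ≠ '\n') :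
    padNL p (c :: t) = c :: padNL p t := by
  simp [padNL, hc]

theorem mySplit_nil (pre : List Char) : mySplit pre [] = [pre] := rfl

theorem mySplit_cons_nl (pre t : List Char) : mySplit pre ('\n' :: t) = pre :: mySplit [] t := by
  simp [mySplit]

theorem mySplit_cons (pre : List Char) (c : Char) (t : List Char) (hc : c ≠ '\n') :
    mySplit pre (c :: t) = mySplit (pre ++ [c]) t := by
  simp [mySplit, hc]

theorem mySplit_ne_nil (pre l) : mySplit pre l ≠ [] := by
  induction l generalizing pre with
  | nil => simp [mySplit]
  | cons c t ih => by_cases h : c = '\n' <;> simp [mySplit, h, ih]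

theorem isPrefixOf_nl (c : Char) (t : List Char) :
    List.isPrefixOf ['\n'] (c :: t) = (c == '\n') := by
  simp [List.isPrefixOf, BEq.comm]

theorem replace_go_eq (p : List Char) :
    ∀ fuel l acc, l.length ≤ fuel →
      PySem.Chars.replace.go ['\n'] ('\n' :: p) fuel l acc = acc.reverse ++ padNL p l := by
  intro fuel
  induction fuel with
  | zero =>
    intro l acc h
    have : l = [] := by cases l <;> simp_all
    subst this; simp [PySem.Chars.replace.go, padNL]
  | succ n ih =>
    intro l acc h
    cases l with
    | nil => simp [PySem.Chars.replace.go, padNL]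
    | cons c t =>
      rw [PySem.Chars.replace.go]
      by_cases hc : c = '\n'
      · subst hc
        simp only [isPrefixOf_nl, beq_self_eq_true, if_true]
        have hd : List.drop (['\n'].length) ('\n' :: t) = t := rfl
        rw [hd, ih t _ (by simpa using Nat.le_of_succ_le_succ h)]
        simp [padNL_cons_nl]
      · simp only [isPrefixOf_nl, beq_eq_false_iff_ne.mpr hc, Bool.false_eq_true, if_false]
        rw [ih t _ (by simpa using Nat.le_of_succ_le_succ h)]
        simp [padNL_cons p c t hc]

theorem splitOn_go_eq :
    ∀ fuel l cur acc, l.length + 1 ≤ fuel →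
      PySem.Chars.splitOn.go ['\n'] fuel l cur acc = acc.reverse ++ mySplit cur.reverse l := by
  intro fuel
  induction fuel with
  | zero => intro l cur acc h; omega
  | succ n ih =>
    intro l cur acc h
    cases l with
    | nil =>
      rw [PySem.Chars.splitOn.go]
      simp [mySplit_nil]
      omega
    | cons c t =>
      rw [PySem.Chars.splitOn.go]
      by_cases hc : c = '\n'
      · subst hc
        simp only [isPrefixOf_nl, beq_self_eq_true, if_true]
        have hd : List.drop (['\n'].length) ('\n' :: t) = t := rfl
        rw [hd, ih t [] _ (by simpa using Nat.le_of_succ_le_succ h)]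
        simp [mySplit_cons_nl]
      · simp only [isPrefixOf_nl, beq_eq_false_iff_ne.mpr hc, Bool.false_eq_true, if_false]
        rw [ih t (c :: cur) _ (by simpa using Nat.le_of_succ_le_succ h)]
        simp [mySplit_cons _ c t hc]

theorem splitOn_eq_mySplit (s : List Char) :
    PySem.Chars.splitOn s ['\n'] = mySplit [] s := by
  unfold PySem.Chars.splitOn
  rw [splitOn_go_eq (s.length + 1) s [] [] (le_refl _)]
  simp

theorem replace_eq_padNL (p : List Char) (s : List Char) :
    PySem.Chars.replace s ['\n'] ('\n' :: p) = padNL p s := by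
  unfold PySem.Chars.replace
  simp only [List.isEmpty_cons, Bool.false_eq_true, if_false]
  exact replace_go_eq p s.length s [] (le_refl _)

theorem join_map_mySplit (p : List Char) :
    ∀ l pre, PySem.Chars.join ['\n'] ((mySplit pre l).map (p ++ ·)) = p ++ pre ++ padNL p l := by
  intro l
  induction l with
  | nil => intro pre; simp [mySplit_nil, padNL_nil, PySem.Chars.join, List.intercalate]
  | cons c t ih =>
    intro pre
    by_cases hc : c = '\n'
    · subst hc
      rw [mySplit_cons_nl, padNL_cons_nl]
      obtain ⟨h, rest, hrest⟩ : ∃ h rest, mySplit [] t = h :: rest := by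
        cases hms : mySplit [] t with
        | nil => exact absurd hms (mySplit_ne_nil [] t)
        | cons h rest => exact ⟨h, rest, rfl⟩
      have hih := ih []
      rw [hrest] at hih ⊢
      simp only [List.map_cons] at hih ⊢
      rw [PySem.Chars.join_cons_cons, hih]
      simp
    · rw [mySplit_cons _ c t hc, padNL_cons p c t hc, ih (pre ++ [c])]
      simp
theorem join_headTail_mySplit (p : List Char) :
    ∀ l pre, PySem.Chars.join ['\n']
        ((mySplit pre l).headI :: ((mySplit pre l).tail).map (p ++ ·)) = pre ++ padNL p l := by
  intro l
  induction l with
  | nil => intro pre; simp [mySplit_nil, padNL_nil, PySem.Chars.join, List.intercalate]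
  | cons c t ih =>
    intro pre
    by_cases hc : c = '\n'
    · subst hc
      rw [mySplit_cons_nl, padNL_cons_nl]
      obtain ⟨h, rest, hrest⟩ : ∃ h rest, mySplit [] t = h :: rest := by
        cases hms : mySplit [] t with
        | nil => exact absurd hms (mySplit_ne_nil [] t)
        | cons h rest => exact ⟨h, rest, rfl⟩
      have hj := join_map_mySplit p t []
      rw [hrest] at hj ⊢
      simp only [List.map_cons] at hj ⊢
      simp only [List.headI, List.tail, List.map_cons]
      rw [PySem.Chars.join_cons_cons, hj]
      simp
    · rw [mySplit_cons _ c t hc, padNL_cons p c t hc, ih (pre ++ [c])]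
      simp

theorem getD_append_len {α : Type} (pre : List α) (x : α) (t : List α) (d : α) :
    (pre ++ x :: t).getD pre.length d = x := by
  induction pre with
  | nil => rfl
  | cons y ys ih => simpa using ih

theorem set_append_len {α : Type} (pre : List α) (x : α) (t : List α) (y : α) :
    (pre ++ x :: t).set pre.length y = pre ++ y :: t := by
  induction pre with
  | nil => rfl
  | cons z zs ih => simpa using ih

theorem pyRange_self (a : Int) : PySem.List.pyRange a a 1 = [] := by
  unfold PySem.List.pyRange
  simp

/-- The index loop over `pyRange pre.length (pre.length + ls.length)` that conditionally
rewrites entry i in place. -/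
theorem foldl_set_loop {α : Type} (c : Int → Bool) (f : α → α) (d : α) :
    ∀ (ls pre : List α),
      (PySem.List.pyRange (pre.length : Int) (((pre.length + ls.length : ℕ) : Int)) 1).foldl
          (fun acc i => if c i then acc else acc.set i.toNat (f (acc.getD i.toNat d))) (pre ++ ls)
        = pre ++ (ls.zipIdx pre.length).map (fun xi => if c (xi.2 : Int) then xi.1 else f xi.1) := by
  intro ls
  induction ls with
  | nil =>
    intro pre
    simp only [List.length_nil, Nat.add_zero, pyRange_self]
    simp
  | cons x t ih =>
    intro pre
    have hlt : (pre.length : Int) < ((pre.length + (x :: t).length : ℕ) : Int) := by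
      simp only [List.length_cons]; push_cast; omega
    rw [PySem.List.pyRange_one_cons hlt]
    simp only [List.foldl_cons]
    have htoNat : ((pre.length : Int)).toNat = pre.length := Int.toNat_natCast _
    have hstep :
        (if c (pre.length : Int) then pre ++ x :: t
          else (pre ++ x :: t).set ((pre.length : Int)).toNat
                 (f ((pre ++ x :: t).getD ((pre.length : Int)).toNat d)))
        = pre ++ (if c (pre.length : Int) then x else f x) :: t := by
      rw [htoNat, getD_append_len, set_append_len]
      by_cases hcond : c (pre.length : Int) <;> simp [hcond]
    rw [hstep]
    have harith : ((pre.length : Int)) + 1 = (((pre ++ [if c (pre.length : Int) then x else f x]).length : ℕ) : Int) := by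
      simp only [List.length_append, List.length_cons, List.length_nil]
      push_cast; omega
    have hlen : ((pre.length + (x :: t).length : ℕ) : Int)
        = (((pre ++ [if c (pre.length : Int) then x else f x]).length + t.length : ℕ) : Int) := by
      simp only [List.length_append, List.length_cons, List.length_nil]
      push_cast; omega
    have hsplit : pre ++ (if c (pre.length : Int) then x else f x) :: t
        = (pre ++ [if c (pre.length : Int) then x else f x]) ++ t := by simp
    rw [harith, hlen, hsplit, ih (pre ++ [if c (pre.length : Int) then x else f x])]
    by_cases hcond : c (pre.length : Int) <;>
      simp [hcond, List.zipIdx_cons, List.append_assoc]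

theorem natCast_beq_zero (k : ℕ) : ((k : Int) == 0) = (k == 0) := by
  by_cases h : k = 0 <;> simp [h]

theorem zipIdx_pad_tail (p : List Char) :
    ∀ (t : List (List Char)) (k : ℕ),
      (t.zipIdx (k + 1)).map
          (fun xi => if xi.2 == 0 then xi.1 else p ++ xi.1) = t.map (p ++ ·) := by
  intro t
  induction t with
  | nil => intro k; simp
  | cons x r ih =>
    intro k
    simp only [List.zipIdx_cons, List.map_cons, ih (k + 1)]
    simp

theorem zipIdx_map_fst {α β : Type} (f : α → β) :
    ∀ (l : List α) (k : ℕ), (l.zipIdx k).map (fun xi => f xi.1) = l.map f := by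
  intro l
  induction l with
  | nil => intro k; simp
  | cons x t ih => intro k; simp [List.zipIdx_cons, ih]

/-- A's loop, fully characterised (on a nonempty line list). -/
theorem loop_eq (p : List Char) (start : Bool) (lines : List (List Char)) (hne : lines ≠ []) :
    (PySem.List.pyRange 0 (lines.length : Int) 1).foldl
        (fun ls i =>
          if !start && i == 0 then ls
          else ls.set i.toNat (p ++ ls.getD i.toNat [])) lines
      = if start then lines.map (p ++ ·)
        else lines.headI :: (lines.tail).map (p ++ ·) := by
  have hsl := foldl_set_loop (fun i => !start && (i == 0)) (fun x => p ++ x) ([] : List Char)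
      lines []
  simp only [List.length_nil, Nat.cast_zero, Nat.zero_add, List.nil_append] at hsl
  rw [hsl]
  cases start with
  | true =>
    simp only [Bool.not_true, Bool.false_and, if_true, Bool.false_eq_true, if_false]
    exact zipIdx_map_fst _ lines 0
  | false =>
    cases lines with
    | nil => exact absurd rfl hne
    | cons h t =>
      simp only [Bool.not_false, Bool.true_and, List.zipIdx_cons, List.map_cons,
        List.headI, List.tail, natCast_beq_zero]
      simp only [beq_self_eq_true, if_true]
      rw [zipIdx_pad_tail p t 0]
      simp

-- ===== VERDICT (by name: the statement is the Claim_ definition above) =====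
theorem left_pad_string_spec : Claim_equal_left_pad_string := by
  unfold Claim_equal_left_pad_string
  intro s n st _
  unfold Spec_left_pad_string left_pad_string left_pad_string_alt
  simp only [splitOn_eq_mySplit, replace_eq_padNL]
  rw [loop_eq _ st _ (mySplit_ne_nil [] s.toList)]
  cases st with
  | true =>
    simp only [if_true]
    rw [join_map_mySplit]
    simp
  | false =>
    simp only [Bool.false_eq_true, if_false]
    rw [join_headTail_mySplit]
    simp
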